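-- pv_equiv track=rewrite | github.com/opiat17/ds-agent-forkcz | modules/sender.py | _summarize_messages_for_prompt
-- ===== SOURCE A (Python) =====
-- def _summarize_messages_for_prompt(
--     messages: list[dict[str, str]], max_chars: int = 1500
-- ) -> str:
--     """
--     messages: [{ "author": "Nick", "content": "text", "ts": "..." }, ...]
--     Hard-trims content to max_chars while keeping the gist.
--     """
--     lines: list[str] = []
--     for m in messages:
--         content = (m.get("content") or "").strip().replace("\n", " ")
--         if not content:
--             continue
--         author = m.get("author") or "user"
--         lines.append(f"{author}: {content}")
--         if sum(len(x) for x in lines) > max_chars: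
--             break
--     return "\n".join(lines[-50:])  # the most recent part matters
-- ===== SOURCE B (Python) =====
-- def _fmt(m):
--     content = (m.get("content") or "").strip().replace("\n", " ")
--     if not content:
--         return None
--     return f"{m.get('author') or 'user'}: {content}"
--
--
-- def _summarize_messages_for_prompt(
--     messages: list[dict[str, str]], max_chars: int = 1500
-- ) -> str:
--     # format every message first, dropping empties
--     lines = [s for s in map(_fmt, messages) if s is not None]
--     # one pass of prefix sums of the line lengths
--     totals = []
--     t = 0
--     for s in lines:
--         t += len(s)
--         totals.append(t)
--     # first index whose cumulative length exceeds max_chars is kept inclusively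
--     cut = next((i + 1 for i, tot in enumerate(totals) if tot > max_chars), len(lines))
--     return "\n".join(lines[:cut][-50:])
-- ===== Notes on version B (the rewrite author's own statement) =====
-- stated objective: alternative
-- what changed: B separates the work into three passes: format all messages into non-empty lines with a map/filter, compute prefix sums of line lengths in one accumulator pass, and slice at the first index whose cumulative length exceeds max_chars, instead of A's single loop that re-sums the whole line list after every append and breaks.
import Mathlib
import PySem

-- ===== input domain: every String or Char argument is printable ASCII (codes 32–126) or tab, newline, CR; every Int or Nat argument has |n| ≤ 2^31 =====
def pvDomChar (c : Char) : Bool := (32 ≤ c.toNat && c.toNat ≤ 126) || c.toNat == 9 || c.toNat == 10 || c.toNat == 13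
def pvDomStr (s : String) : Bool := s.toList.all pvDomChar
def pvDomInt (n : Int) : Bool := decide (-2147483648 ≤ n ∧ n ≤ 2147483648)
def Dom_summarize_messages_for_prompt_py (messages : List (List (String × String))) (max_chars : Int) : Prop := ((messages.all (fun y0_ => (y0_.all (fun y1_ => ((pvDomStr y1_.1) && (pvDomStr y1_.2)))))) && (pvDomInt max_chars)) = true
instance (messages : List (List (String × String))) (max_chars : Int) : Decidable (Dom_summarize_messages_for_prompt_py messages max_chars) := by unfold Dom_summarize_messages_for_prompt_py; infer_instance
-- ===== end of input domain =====

-- B restructures A's single break-on-overflow loop into format-all / prefix-sums / cut, proven to return the same string.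

-- ===== PORT A =====
-- A's loop: append formatted lines, re-sum all line lengths after each append, break once the sum exceeds max_chars.
def pvA_loop (max_chars : Int) : List (List (String × String)) → List String → List String
  | [], lines => lines
  | m :: rest, lines =>
    let content := PySem.Str.replace (PySem.Str.strip (((PySem.Dict.mk m).get? "content").getD "")) "\n" " "
    if content = "" then pvA_loop max_chars rest lines
    else
      let author := let a := ((PySem.Dict.mk m).get? "author").getD ""; if a = "" then "user" else a
      let lines' := lines ++ [author ++ ": " ++ content]
      if lines'.foldl (fun s x => s + PySem.Str.len x) 0 > max_chars then lines'
      else pvA_loop max_chars rest lines'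

def summarize_messages_for_prompt_py (messages : List (List (String × String))) (max_chars : Int) : String :=
  let lines := pvA_loop max_chars messages []
  PySem.Str.join "\n" (PySem.List.slice lines (some (-50)) none)

-- ===== PORT B =====
-- B's _fmt helper
def pvB_fmt (m : List (String × String)) : Option String :=
  let content := PySem.Str.replace (PySem.Str.strip (((PySem.Dict.mk m).get? "content").getD "")) "\n" " "
  if content = "" then none
  else
    let author := let a := ((PySem.Dict.mk m).get? "author").getD ""; if a = "" then "user" else a
    some (author ++ ": " ++ content)

-- B's prefix-sum pass over the line lengths
def pvB_totals (t : Int) : List String → List Int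
  | [] => []
  | s :: rest => (t + PySem.Str.len s) :: pvB_totals (t + PySem.Str.len s) rest

def summarize_messages_for_prompt_py_alt (messages : List (List (String × String))) (max_chars : Int) : String :=
  let lines := messages.filterMap pvB_fmt
  let totals := pvB_totals 0 lines
  let cut : Int := match totals.findIdx? (fun tot => tot > max_chars) with
    | some i => (i : Int) + 1
    | none => PySem.List.len lines
  PySem.Str.join "\n" (PySem.List.slice (PySem.List.slice lines none (some cut)) (some (-50)) none)

-- ===== PRECONDITION & SPEC =====
def Spec_summarize_messages_for_prompt_py (messages : List (List (String × String))) (max_chars : Int) (out : String) : Prop := out = summarize_messages_for_prompt_py_alt messages max_chars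
instance (messages : List (List (String × String))) (max_chars : Int) (out : String) : Decidable (Spec_summarize_messages_for_prompt_py messages max_chars out) := by unfold Spec_summarize_messages_for_prompt_py; infer_instance

-- ===== CLAIM (what is proved, stated in full; the proofs are below) =====
def Claim_equal_summarize_messages_for_prompt_py : Prop := ∀ (messages : List (List (String × String))) (max_chars : Int), Dom_summarize_messages_for_prompt_py messages max_chars → Spec_summarize_messages_for_prompt_py messages max_chars (summarize_messages_for_prompt_py messages max_chars)

-- ===== LEMMAS AND PROOFS =====

-- proof-side: the prefix of `lines` kept when the running sum (starting at t) first exceeds max_chars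
def pvCutL (max_chars : Int) : Int → List String → List String
  | _, [] => []
  | t, s :: rest =>
    s :: (if t + PySem.Str.len s > max_chars then [] else pvCutL max_chars (t + PySem.Str.len s) rest)

theorem pvSumLen_append (lines : List String) (x : String) :
    (lines ++ [x]).foldl (fun s y => s + PySem.Str.len y) 0
      = lines.foldl (fun s y => s + PySem.Str.len y) 0 + PySem.Str.len x := by
  have h : ∀ (l : List String) (a : Int),
      (l ++ [x]).foldl (fun s y => s + PySem.Str.len y) a
        = l.foldl (fun s y => s + PySem.Str.len y) a + PySem.Str.len x := by
    intro l
    induction l with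
    | nil => intro a; simp
    | cons hd tl ih => intro a; simp only [List.cons_append, List.foldl]; exact ih _
  exact h lines 0

theorem pvA_loop_cons (max_chars : Int) (m : List (String × String))
    (rest : List (List (String × String))) (lines : List String) :
    pvA_loop max_chars (m :: rest) lines =
      if PySem.Str.replace (PySem.Str.strip (((PySem.Dict.mk m).get? "content").getD "")) "\n" " " = ""
      then pvA_loop max_chars rest lines
      else
        if (lines ++ [(if ((PySem.Dict.mk m).get? "author").getD "" = "" then "user"
                else ((PySem.Dict.mk m).get? "author").getD "")
              ++ ": " ++ PySem.Str.replace (PySem.Str.strip (((PySem.Dict.mk m).get? "content").getD "")) "\n" " "]).foldl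
            (fun s x => s + PySem.Str.len x) 0 > max_chars
        then lines ++ [(if ((PySem.Dict.mk m).get? "author").getD "" = "" then "user"
                else ((PySem.Dict.mk m).get? "author").getD "")
              ++ ": " ++ PySem.Str.replace (PySem.Str.strip (((PySem.Dict.mk m).get? "content").getD "")) "\n" " "]
        else pvA_loop max_chars rest
          (lines ++ [(if ((PySem.Dict.mk m).get? "author").getD "" = "" then "user"
                else ((PySem.Dict.mk m).get? "author").getD "")
              ++ ": " ++ PySem.Str.replace (PySem.Str.strip (((PySem.Dict.mk m).get? "content").getD "")) "\n" " "]) := rfl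

theorem pvB_fmt_eq (m : List (String × String)) :
    pvB_fmt m =
      if PySem.Str.replace (PySem.Str.strip (((PySem.Dict.mk m).get? "content").getD "")) "\n" " " = ""
      then none
      else some ((if ((PySem.Dict.mk m).get? "author").getD "" = "" then "user"
                else ((PySem.Dict.mk m).get? "author").getD "")
              ++ ": " ++ PySem.Str.replace (PySem.Str.strip (((PySem.Dict.mk m).get? "content").getD "")) "\n" " ") := rfl

-- A's loop equals acc ++ the cut of B's full line list, running sum starting at sum(acc)
theorem pvA_loop_eq (max_chars : Int) (msgs : List (List (String × String))) :
    ∀ (lines : List String),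
      pvA_loop max_chars msgs lines
        = lines ++ pvCutL max_chars (lines.foldl (fun s y => s + PySem.Str.len y) 0) (msgs.filterMap pvB_fmt) := by
  induction msgs with
  | nil => intro lines; simp [pvA_loop, pvCutL]
  | cons m rest ih =>
    intro lines
    rw [pvA_loop_cons, List.filterMap_cons, pvB_fmt_eq]
    by_cases hc : PySem.Str.replace (PySem.Str.strip (((PySem.Dict.mk m).get? "content").getD "")) "\n" " " = ""
    · rw [if_pos hc, if_pos hc, ih]
    · rw [if_neg hc, if_neg hc]
      rw [pvCutL]
      rw [pvSumLen_append]
      by_cases hs : lines.foldl (fun s y => s + PySem.Str.len y) 0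
          + PySem.Str.len ((if ((PySem.Dict.mk m).get? "author").getD "" = "" then "user"
              else ((PySem.Dict.mk m).get? "author").getD "")
            ++ ": " ++ PySem.Str.replace (PySem.Str.strip (((PySem.Dict.mk m).get? "content").getD "")) "\n" " ") > max_chars
      · rw [if_pos hs, if_pos hs]
      · rw [if_neg hs, if_neg hs, ih, pvSumLen_append]
        simp

-- B's take-to-cut equals the same cut, for any starting running sum
theorem pvB_take_eq (max_chars : Int) (lines : List String) :
    ∀ (t : Int),
      (match (pvB_totals t lines).findIdx? (fun tot => tot > max_chars) with
        | some i => lines.take (i + 1)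
        | none => lines.take lines.length)
        = pvCutL max_chars t lines := by
  induction lines with
  | nil => intro t; simp [pvB_totals, pvCutL]
  | cons s rest ih =>
    intro t
    rw [pvB_totals, pvCutL]
    by_cases h : t + PySem.Str.len s > max_chars
    · rw [List.findIdx?_cons, if_pos (by simpa using h), if_pos h]
      rfl
    · rw [List.findIdx?_cons, if_neg (by simpa using h), if_neg h]
      cases hfi : (pvB_totals (t + PySem.Str.len s) rest).findIdx? (fun tot => tot > max_chars) with
      | none =>
        have := ih (t + PySem.Str.len s)
        rw [hfi] at this
        simp only [Option.map_none]
        show List.take (s :: rest).length (s :: rest) = s :: pvCutL max_chars (t + PySem.Str.len s) rest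
        rw [← this]
        simp
      | some i =>
        have := ih (t + PySem.Str.len s)
        rw [hfi] at this
        simp only [Option.map_some]
        show List.take (i + 1 + 1) (s :: rest) = s :: pvCutL max_chars (t + PySem.Str.len s) rest
        rw [← this]
        simp

theorem pvB_sliced (max_chars : Int) (messages : List (List (String × String))) :
    PySem.List.slice (messages.filterMap pvB_fmt) none
        (some (match (pvB_totals 0 (messages.filterMap pvB_fmt)).findIdx? (fun tot => tot > max_chars) with
          | some i => (i : Int) + 1
          | none => PySem.List.len (messages.filterMap pvB_fmt)))
      = pvCutL max_chars 0 (messages.filterMap pvB_fmt) := by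
  have hmain := pvB_take_eq max_chars (messages.filterMap pvB_fmt) 0
  cases hfi : (pvB_totals 0 (messages.filterMap pvB_fmt)).findIdx? (fun tot => tot > max_chars) with
  | some i =>
    rw [hfi] at hmain
    show PySem.List.slice (messages.filterMap pvB_fmt) none (some ((i : Int) + 1)) = _
    have hcast : ((i : Int) + 1) = ((i + 1 : Nat) : Int) := by push_cast; ring
    rw [hcast, PySem.List.slice_to_natCast]
    exact hmain
  | none =>
    rw [hfi] at hmain
    show PySem.List.slice (messages.filterMap pvB_fmt) none (some (PySem.List.len (messages.filterMap pvB_fmt))) = _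
    rw [PySem.List.len_eq, PySem.List.slice_to_natCast]
    exact hmain

-- ===== VERDICT (by name: the statement is the Claim_ definition above) =====
theorem summarize_messages_for_prompt_py_spec : Claim_equal_summarize_messages_for_prompt_py := by
  intro messages max_chars _
  show _ = _
  unfold summarize_messages_for_prompt_py summarize_messages_for_prompt_py_alt
  simp only [pvB_sliced]
  rw [pvA_loop_eq max_chars messages []]
  simp
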